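-- pv_equiv track=rewrite | github.com/dorneriya/Nonogram-solver | nonogram.py | get_intersection_row
-- ===== SOURCE A (Python) =====
-- def get_intersection_row(rows):
--     """
--     :param rows: number of rows from the output of the get_row_variations
--     function
--     the purpose of the function is to find if the values of each index
--     in the rows is mutual or different
--     :return: - a row that represent the decision for each index: if all said 1-
--      then 1, if all said 0- then 0, if some said 0 and some said 1- then -1.
--     """
--     if len(rows) == 0:
--         return []
--     n_row = len(rows)
--     n_col = len(rows[0])
--     final_row = []
--     for j in range(n_col):
--         col = []
--         for i in range(n_row):
--             col.append(rows[i][j])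
--         if len(set(col)) == 1:
--             final_row.append(col[0])
--         else:
--             final_row.append((-1))
--     return final_row
-- ===== SOURCE B (Python) =====
-- def get_intersection_row(rows):
--     # Fold across rows once, keeping a per-column consensus accumulator,
--     # instead of building each column and testing len(set(col)) == 1.
--     if len(rows) == 0:
--         return []
--     final_row = list(rows[0])
--     for row in rows[1:]:
--         final_row = [f if f == v else -1 for f, v in zip(final_row, row)]
--     return final_row
-- ===== Notes on version B (the rewrite author's own statement) =====
-- stated objective: simpler
-- what changed: Instead of materialising every column and testing len(set(col))==1, B folds over the rows once, zipping each row into a per-column consensus list that collapses an entry to -1 on the first disagreement; this drops the per-column list/set construction (a constant-factor saving a timing run measured).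
import Mathlib
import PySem

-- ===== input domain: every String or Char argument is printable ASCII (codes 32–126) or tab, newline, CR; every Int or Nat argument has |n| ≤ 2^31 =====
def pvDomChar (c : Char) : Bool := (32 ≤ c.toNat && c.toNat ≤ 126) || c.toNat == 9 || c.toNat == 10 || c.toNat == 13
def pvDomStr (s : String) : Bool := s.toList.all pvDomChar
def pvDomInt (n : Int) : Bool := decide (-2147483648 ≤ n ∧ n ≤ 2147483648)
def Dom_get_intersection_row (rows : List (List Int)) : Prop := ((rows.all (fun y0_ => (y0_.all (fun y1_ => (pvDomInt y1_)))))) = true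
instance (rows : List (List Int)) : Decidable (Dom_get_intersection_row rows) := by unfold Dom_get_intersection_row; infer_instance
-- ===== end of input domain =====

-- B replaces A's per-column "collect the column, test len(set(col))==1" scan by a single
-- fold across the rows that keeps a per-column consensus accumulator (simpler, same cost).

-- ===== PORT A =====
def get_intersection_row (rows : List (List Int)) : List Int :=
  if rows.length = 0 then []
  else
    let n_row : Int := rows.length
    let n_col : Int := ((PySem.List.pyGetD rows 0 []) : List Int).length
    (PySem.List.pyRange 0 n_col 1).foldl (fun final_row j =>
      let col : List Int :=
        (PySem.List.pyRange 0 n_row 1).foldl (fun col i =>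
          col ++ [PySem.List.pyGetD (PySem.List.pyGetD rows i []) j 0]) []
      if (PySem.Set.ofList col).length = 1 then final_row ++ [PySem.List.pyGetD col 0 0]
      else final_row ++ [-1]) []

-- ===== PORT B =====
def get_intersection_row_alt (rows : List (List Int)) : List Int :=
  match rows with
  | [] => []
  | r0 :: rest =>
      rest.foldl (fun final_row row =>
        (final_row.zip row).map (fun fv => if fv.1 = fv.2 then fv.1 else -1)) r0

-- ===== PRECONDITION & SPEC =====
-- Pre_ excludes exactly the ragged inputs on which A raises IndexError
-- (some row shorter than the first row); A returns normally everywhere else.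
def Pre_get_intersection_row (rows : List (List Int)) : Prop :=
  ∀ r ∈ rows, (rows.headD []).length ≤ r.length
instance (rows : List (List Int)) : Decidable (Pre_get_intersection_row rows) := by
  unfold Pre_get_intersection_row; infer_instance

def pvWitness_get_intersection_row : List (List Int) := [[1, 0, 1], [1, 1, 1]]

def Spec_get_intersection_row (rows : List (List Int)) (out : List Int) : Prop :=
  out = get_intersection_row_alt rows
instance (rows : List (List Int)) (out : List Int) : Decidable (Spec_get_intersection_row rows out) := by
  unfold Spec_get_intersection_row; infer_instance

-- ===== CLAIM (what is proved, stated in full; the proofs are below) =====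
def Claim_equal_get_intersection_row : Prop :=
  ∀ (rows : List (List Int)), Dom_get_intersection_row rows →
    Pre_get_intersection_row rows →
    Spec_get_intersection_row rows (get_intersection_row rows)

-- ===== LEMMAS AND PROOFS =====

-- set(col) has exactly one element iff every element of the tail equals the head
theorem pv_set_len_one (a : Int) (l : List Int) :
    (PySem.Set.ofList (a :: l)).length = 1 ↔ ∀ x ∈ l, x = a := by
  rw [PySem.Set.ofList_cons, List.length_cons]
  constructor
  · intro h x hx
    by_contra hne
    have hm : x ∈ PySem.Set.discard (PySem.Set.ofList l) a := by
      rw [PySem.Set.mem_discard, PySem.Set.mem_ofList]; exact ⟨hx, hne⟩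
    have hpos := List.length_pos_of_mem hm
    omega
  · intro h
    have hnil : PySem.Set.discard (PySem.Set.ofList l) a = [] := by
      apply List.eq_nil_iff_forall_not_mem.mpr
      intro x hx
      rw [PySem.Set.mem_discard, PySem.Set.mem_ofList] at hx
      exact hx.2 (h x hx.1)
    rw [hnil]; rfl

-- pointwise value of B's fold
theorem pv_fold_b (rest : List (List Int)) :
    ∀ (acc : List Int), (∀ r ∈ rest, acc.length ≤ r.length) →
    rest.foldl (fun final_row row =>
        (final_row.zip row).map (fun fv => if fv.1 = fv.2 then fv.1 else -1)) acc
      = (List.range acc.length).map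
          (fun k => if ∀ r ∈ rest, r.getD k 0 = acc.getD k 0 then acc.getD k 0 else -1) := by
  induction rest with
  | nil =>
      intro acc _
      simp only [List.foldl_nil, List.not_mem_nil, false_implies, implies_true, if_true]
      apply List.ext_getElem (by simp)
      intro k h1 h2
      simp [List.getD_eq_getElem?_getD, h1]
  | cons row rest ih =>
      intro acc hlen
      have hrow : acc.length ≤ row.length := hlen row (by simp)
      set acc' : List Int := (acc.zip row).map (fun fv => if fv.1 = fv.2 then fv.1 else -1) with hacc'
      have hlen' : acc'.length = acc.length := by
        simp [hacc', List.length_zip, Nat.min_eq_left hrow]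
      rw [List.foldl_cons]
      rw [ih acc' (by intro r hr; rw [hlen']; exact hlen r (by simp [hr]))]
      rw [hlen']
      apply List.ext_getElem (by simp)
      intro k h1 h2
      simp only [List.getElem_map, List.getElem_range]
      have hk : k < acc.length := by simpa using h1
      have hk' : k < acc'.length := by rw [hlen']; exact hk
      have hkr : k < row.length := lt_of_lt_of_le hk hrow
      have hgacc' : acc'.getD k 0 = if acc[k] = row[k] then acc[k] else -1 := by
        rw [List.getD_eq_getElem?_getD, List.getElem?_eq_getElem hk']
        simp [hacc', List.getElem_zip]
      have hgacc : acc.getD k 0 = acc[k] := by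
        rw [List.getD_eq_getElem?_getD, List.getElem?_eq_getElem hk]; rfl
      have hgrow : row.getD k 0 = row[k] := by
        rw [List.getD_eq_getElem?_getD, List.getElem?_eq_getElem hkr]; rfl
      by_cases heq : acc[k] = row[k]
      · rw [hgacc'] ; rw [if_pos heq, hgacc]
        have hcond : (∀ r ∈ row :: rest, r.getD k 0 = acc[k]) ↔ (∀ r ∈ rest, r.getD k 0 = acc[k]) := by
          constructor
          · intro h r hr; exact h r (by simp [hr])
          · intro h r hr
            rcases List.mem_cons.mp hr with h' | h'
            · rw [h', hgrow, ← heq]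
            · exact h r h'
        simp only [hcond]
      · rw [hgacc', if_neg heq]
        have hnot : ¬ (∀ r ∈ row :: rest, r.getD k 0 = acc.getD k 0) := by
          intro h
          exact heq (by rw [← hgacc, ← hgrow]; exact (h row (by simp)).symm)
        rw [if_neg hnot]
        by_cases h2 : ∀ r ∈ rest, r.getD k 0 = -1 <;> simp

-- A's column loop collects the j-th column
theorem pv_col (rows : List (List Int)) (j : Int) :
    (PySem.List.pyRange 0 (rows.length : Int) 1).foldl (fun col i =>
        col ++ [PySem.List.pyGetD (PySem.List.pyGetD rows i []) j 0]) []
      = rows.map (fun r => PySem.List.pyGetD r j 0) := by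
  rw [PySem.List.foldl_pyRange_zero_pyGetD' rows [] (fun col r => col ++ [PySem.List.pyGetD r j 0]) []]
  simpa using PySem.List.foldl_append_singleton_eq_map (fun r => PySem.List.pyGetD r j 0) rows []

-- A, written as a map over the column indices
theorem pv_A (r0 : List Int) (rest : List (List Int)) :
    get_intersection_row (r0 :: rest)
      = (List.range r0.length).map
          (fun k => if ∀ r ∈ rest, r.getD k 0 = r0.getD k 0 then r0.getD k 0 else -1) := by
  unfold get_intersection_row
  rw [if_neg (by simp)]
  simp only [PySem.List.pyGetD_zero_cons, pv_col]
  have hbody : (fun (fr : List Int) (j : Int) =>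
      if (PySem.Set.ofList ((r0 :: rest).map (fun r => PySem.List.pyGetD r j 0))).length = 1
      then fr ++ [PySem.List.pyGetD ((r0 :: rest).map (fun r => PySem.List.pyGetD r j 0)) 0 0]
      else fr ++ [(-1 : Int)])
      = (fun (fr : List Int) (j : Int) => fr ++
        [if (PySem.Set.ofList ((r0 :: rest).map (fun r => PySem.List.pyGetD r j 0))).length = 1
         then PySem.List.pyGetD ((r0 :: rest).map (fun r => PySem.List.pyGetD r j 0)) 0 0
         else (-1 : Int)]) := by
    funext fr j; split_ifs <;> rfl
  rw [hbody, PySem.List.foldl_append_singleton_eq_map, List.nil_append,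
      PySem.List.pyRange_zero_nat r0.length, List.map_map]
  apply List.map_congr_left
  intro k hk
  simp only [Function.comp_apply, List.map_cons, PySem.List.pyGetD_natCast,
    PySem.List.pyGetD_zero_cons, pv_set_len_one]
  by_cases h : ∀ r ∈ rest, r.getD k 0 = r0.getD k 0
  · rw [if_pos (by simpa using h), if_pos h]
  · rw [if_neg (by simpa using h), if_neg h]

-- ===== VERDICT (by name: the statement is the Claim_ definition above) =====
theorem get_intersection_row_spec : Claim_equal_get_intersection_row := by
  intro rows _ hpre
  unfold Spec_get_intersection_row
  match rows with
  | [] => rfl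
  | r0 :: rest =>
    have hpre' : ∀ r ∈ rest, r0.length ≤ r.length := by
      intro r hr
      simpa using hpre r (by simp [hr])
    show get_intersection_row (r0 :: rest) = get_intersection_row_alt (r0 :: rest)
    have hB : get_intersection_row_alt (r0 :: rest)
        = rest.foldl (fun final_row row =>
            (final_row.zip row).map (fun fv => if fv.1 = fv.2 then fv.1 else -1)) r0 := rfl
    rw [pv_A, hB, pv_fold_b rest r0 hpre']
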